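-- pv_equiv track=rewrite | github.com/cowaar/advent2019 | Day4/second.py | checkDecreases
-- ===== SOURCE A (Python) =====
-- def checkDecreases(list):
--     containsDecrease = False
--     i = 0
--     while i < len(list) - 1:
--         if list[i] > list[i + 1]:
--             containsDecrease = True
--
--         i += 1
--     return containsDecrease
-- ===== SOURCE B (Python) =====
-- def checkDecreases(list):
--     return list != sorted(list)
-- ===== Notes on version B (the rewrite author's own statement) =====
-- stated objective: simpler
-- what changed: Replaces the manual indexed while-loop scan for an adjacent decrease with the sorted-comparison idiom 'list != sorted(list)'.
import Mathlib
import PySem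

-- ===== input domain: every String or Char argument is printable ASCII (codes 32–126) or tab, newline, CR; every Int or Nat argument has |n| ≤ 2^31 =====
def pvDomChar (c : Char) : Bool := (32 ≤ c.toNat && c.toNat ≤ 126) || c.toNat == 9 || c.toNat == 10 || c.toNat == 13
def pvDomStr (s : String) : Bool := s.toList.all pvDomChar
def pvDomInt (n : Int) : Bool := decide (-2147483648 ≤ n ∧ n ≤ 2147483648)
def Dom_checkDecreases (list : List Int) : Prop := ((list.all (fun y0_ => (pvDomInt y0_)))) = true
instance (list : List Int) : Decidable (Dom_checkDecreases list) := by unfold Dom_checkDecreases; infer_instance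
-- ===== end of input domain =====

-- B replaces A's indexed while-loop scan for an adjacent decrease with 'list != sorted(list)' — simpler, not faster.

-- ===== PORT A =====
-- while i < len(list) - 1: if list[i] > list[i+1]: containsDecrease = True; i += 1
def checkDecreasesLoop (list : List Int) (containsDecrease : Bool) (i : Nat) : Bool :=
  if _h : i < list.length - 1 then
    checkDecreasesLoop list
      (if PySem.List.pyGetD list (i : Int) 0 > PySem.List.pyGetD list ((i : Int) + 1) 0 then true
       else containsDecrease)
      (i + 1)
  else containsDecrease
termination_by list.length - 1 - i

def checkDecreases (list : List Int) : Bool :=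
  checkDecreasesLoop list false 0

-- ===== PORT B =====
-- return list != sorted(list)
def checkDecreases_alt (list : List Int) : Bool :=
  list != PySem.List.sorted list (fun x => x) false

-- ===== PRECONDITION & SPEC =====
def Spec_checkDecreases (list : List Int) (out : Bool) : Prop := out = checkDecreases_alt list
instance (list : List Int) (out : Bool) : Decidable (Spec_checkDecreases list out) := by unfold Spec_checkDecreases; infer_instance

-- ===== CLAIM (what is proved, stated in full; the proofs are below) =====
def Claim_equal_checkDecreases : Prop := ∀ (list : List Int), Dom_checkDecreases list → Spec_checkDecreases list (checkDecreases list)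

-- ===== LEMMAS AND PROOFS =====

-- A's loop from index i computes: acc OR "the suffix from i has an adjacent decrease".
theorem checkDecreasesLoop_eq (list : List Int) (acc : Bool) (i : Nat) :
    checkDecreasesLoop list acc i = (acc || !decide ((list.drop i).IsChain (· ≤ ·))) := by
  by_cases h : i < list.length - 1
  · have hi : i < list.length := by omega
    have hi1 : i + 1 < list.length := by omega
    rw [checkDecreasesLoop, dif_pos h, checkDecreasesLoop_eq]
    have hd : list.drop i = list[i] :: list.drop (i + 1) :=
      List.drop_eq_getElem_cons hi
    have hd1 : list.drop (i + 1) = list[i + 1] :: list.drop (i + 2) :=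
      List.drop_eq_getElem_cons hi1
    have hg : PySem.List.pyGetD list (i : Int) 0 = list[i] := by
      rw [PySem.List.pyGetD_natCast]; exact List.getD_eq_getElem _ _ hi
    have hg1 : PySem.List.pyGetD list ((i : Int) + 1) 0 = list[i + 1] := by
      have : ((i : Int) + 1) = ((i + 1 : Nat) : Int) := by push_cast; ring
      rw [this, PySem.List.pyGetD_natCast]; exact List.getD_eq_getElem _ _ hi1
    rw [hg, hg1]
    by_cases hlt : list[i + 1] < list[i]
    · have hnc : ¬ (list.drop i).IsChain (· ≤ ·) := by
        rw [hd, hd1, List.isChain_cons_cons]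
        rintro ⟨hab, -⟩; omega
      simp [hlt, hnc]
    · have hle : list[i] ≤ list[i + 1] := not_lt.mp hlt
      have hiff : (list.drop i).IsChain (· ≤ ·) ↔ (list.drop (i + 1)).IsChain (· ≤ ·) := by
        rw [hd, hd1, List.isChain_cons_cons, ← hd1]
        exact and_iff_right hle
      rw [if_neg hlt]
      congr 1
      rw [Bool.not_inj_iff, decide_eq_decide]
      exact hiff.symm
  · rw [checkDecreasesLoop, dif_neg h]
    have hch : (list.drop i).IsChain (· ≤ ·) := by
      rcases Nat.lt_or_ge i list.length with hlt | hge
      · have hlen : (list.drop i).length = 1 := by simp [List.length_drop]; omega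
        rcases List.length_eq_one_iff.mp hlen with ⟨a, ha⟩
        rw [ha]; exact List.isChain_singleton a
      · simp [List.drop_eq_nil_of_le hge]
    simp [hch]
  termination_by list.length - 1 - i

-- sorted(list) == list exactly when list is non-decreasing (adjacent-pair chain).
theorem sorted_eq_self_iff_chain (list : List Int) :
    PySem.List.sorted list (fun x => x) false = list ↔ list.IsChain (· ≤ ·) := by
  constructor
  · intro h
    have hp := PySem.List.sorted_pairwise list (fun x => x) (κ := Int)
    rw [h] at hp
    exact List.isChain_iff_pairwise.mpr hp
  · intro h
    have hp : list.Pairwise (· ≤ ·) := List.isChain_iff_pairwise.mp h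
    exact PySem.List.sorted_eq_self_of_pairwise list (fun x => x) hp

-- ===== VERDICT (by name: the statement is the Claim_ definition above) =====
theorem checkDecreases_spec : Claim_equal_checkDecreases := by
  intro list _
  unfold Spec_checkDecreases checkDecreases checkDecreases_alt
  rw [checkDecreasesLoop_eq]
  by_cases h : list.IsChain (· ≤ ·)
  · have he : PySem.List.sorted list (fun x => x) false = list :=
      (sorted_eq_self_iff_chain list).mpr h
    simp [h, he]
  · have hne : list ≠ PySem.List.sorted list (fun x => x) false := fun he =>
      h ((sorted_eq_self_iff_chain list).mp he.symm)
    simp [h, bne_iff_ne, hne]
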